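-- pv_equiv track=rewrite | github.com/baokui/text_search | passiveRecommend/demo_modelpredict.py | getPunExist
-- ===== SOURCE A (Python) =====
-- def getPunExist(Str,punc=[]):
--     if len(punc)==0:
--         punc = '.,?!。，？！'
--     r = 0
--     for s in Str:
--         if s in punc:
--             r = 1
--             break
--     return r
-- ===== SOURCE B (Python) =====
-- def getPunExist(Str, punc=[]):
--     p = punc if len(punc) != 0 else '.,?!。，？！'
--     return int(bool(set(Str) & set(p)))
-- ===== Notes on version B (the rewrite author's own statement) =====
-- stated objective: simpler
-- what changed: Replaced A's element-by-element scan with early break by one set intersection of the string's characters with the punctuation set, converted to int; no explicit loop, branch or break remains.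
import Mathlib
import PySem

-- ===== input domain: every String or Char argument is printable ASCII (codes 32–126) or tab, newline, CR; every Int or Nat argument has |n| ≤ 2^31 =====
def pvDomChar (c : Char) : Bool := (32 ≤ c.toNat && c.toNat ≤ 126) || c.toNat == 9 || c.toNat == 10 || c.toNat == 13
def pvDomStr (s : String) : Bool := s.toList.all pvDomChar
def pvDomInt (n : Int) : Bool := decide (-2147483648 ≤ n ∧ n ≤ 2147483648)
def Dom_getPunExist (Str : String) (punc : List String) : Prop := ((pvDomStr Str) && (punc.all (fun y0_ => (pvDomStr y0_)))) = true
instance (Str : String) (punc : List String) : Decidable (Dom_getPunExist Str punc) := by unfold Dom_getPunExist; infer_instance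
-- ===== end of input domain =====

-- B replaces A's char-by-char scan with early break by a single set intersection (chars ∩ punctuation), for simplicity.


-- ===== PORT A =====
-- the loop 'for s in Str: if s in punc: r = 1; break' as early-return structural recursion
def pvALoop (mem : Char → Bool) : List Char → Int
  | [] => 0
  | c :: rest => if mem c then 1 else pvALoop mem rest

def getPunExist (Str : String) (punc : List String) : Int :=
  -- 'if len(punc)==0: punc = ".,?!。，？！"' — membership is then char-in-string, else 1-char-string-in-list
  let mem : Char → Bool :=
    if punc.length = 0 then (fun c => (".,?!。，？！".toList).contains c)
    else (fun c => punc.contains (String.ofList [c]))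
  pvALoop mem Str.toList

-- ===== PORT B =====
def getPunExist_alt (Str : String) (punc : List String) : Int :=
  let p : List String := if punc.length ≠ 0 then punc else [".", ",", "?", "!", "。", "，", "？", "！"]
  -- int(bool(set(Str) & set(p)))
  let inter : PySem.Set String :=
    PySem.Set.inter (PySem.Set.ofList (Str.toList.map (fun c => String.ofList [c]))) (PySem.Set.ofList p)
  if inter.isEmpty then 0 else 1

-- ===== PRECONDITION & SPEC =====
def Spec_getPunExist (Str : String) (punc : List String) (out : Int) : Prop := out = getPunExist_alt Str punc
instance (Str : String) (punc : List String) (out : Int) : Decidable (Spec_getPunExist Str punc out) := by unfold Spec_getPunExist; infer_instance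

-- ===== CLAIM (what is proved, stated in full; the proofs are below) =====
def Claim_equal_getPunExist : Prop := ∀ (Str : String) (punc : List String), Dom_getPunExist Str punc → Spec_getPunExist Str punc (getPunExist Str punc)

-- ===== LEMMAS AND PROOFS =====

-- A's break-loop returns 1 iff some character satisfies the membership test
theorem pvALoop_eq_any (mem : Char → Bool) (l : List Char) :
    pvALoop mem l = if l.any mem then 1 else 0 := by
  induction l with
  | nil => rfl
  | cons c rest ih =>
    simp only [pvALoop, List.any_cons]
    by_cases h : mem c = true <;> simp [h, ih]

theorem singleton_mk_inj (c d : Char) : (String.ofList [c] = String.ofList [d]) ↔ c = d := by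
  constructor
  · intro h; have := congrArg String.toList h; simp only [String.toList_ofList] at this; simpa using this
  · intro h; rw [h]

-- default-case membership: char-in-default-string ≡ singleton-string in the default list
theorem default_mem (c : Char) :
    (".,?!。，？！".toList).contains c =
      ([".", ",", "?", "!", "。", "，", "？", "！"] : List String).contains (String.ofList [c]) := by
  have h : ([".", ",", "?", "!", "。", "，", "？", "！"] : List String)
      = (".,?!。，？！".toList).map (fun d => String.ofList [d]) := by decide
  rw [h]
  simp only [List.contains_eq_mem, List.mem_map, decide_eq_decide]

  constructor
  · intro hc; exact ⟨c, hc, rfl⟩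
  · rintro ⟨d, hd, he⟩; rwa [← (singleton_mk_inj d c).mp he]

-- B's intersection is empty iff no character of Str hits the punctuation list
theorem alt_eq (Str : String) (punc : List String) :
    getPunExist_alt Str punc =
      (if Str.toList.any (fun c =>
          let p : List String := if punc.length ≠ 0 then punc else [".", ",", "?", "!", "。", "，", "？", "！"]
          p.contains (String.ofList [c])) then 1 else 0) := by
  unfold getPunExist_alt
  set p : List String := if punc.length ≠ 0 then punc else [".", ",", "?", "!", "。", "，", "？", "！"] with hp
  have hmem : ∀ x, x ∈ PySem.Set.inter (PySem.Set.ofList (Str.toList.map (fun c => String.ofList [c]))) (PySem.Set.ofList p)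
      ↔ x ∈ Str.toList.map (fun c => String.ofList [c]) ∧ x ∈ p := by
    intro x
    simp only [PySem.Set.mem_inter, PySem.Set.mem_ofList]
  by_cases h : Str.toList.any (fun c => p.contains (String.ofList [c])) = true
  · simp only [h, if_true]
    obtain ⟨c, hc, hcp⟩ := List.any_eq_true.mp h
    have : String.ofList [c] ∈ PySem.Set.inter (PySem.Set.ofList (Str.toList.map (fun c => String.ofList [c]))) (PySem.Set.ofList p) := by
      rw [hmem]
      exact ⟨List.mem_map.mpr ⟨c, hc, rfl⟩, by simpa using hcp⟩
    have hne : ¬ (PySem.Set.inter (PySem.Set.ofList (Str.toList.map (fun c => String.ofList [c]))) (PySem.Set.ofList p)).isEmpty = true := by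
      intro he
      rw [List.isEmpty_iff] at he
      rw [he] at this
      exact absurd this (List.not_mem_nil)
    simp [hne]
  · simp only [h]
    have he : (PySem.Set.inter (PySem.Set.ofList (Str.toList.map (fun c => String.ofList [c]))) (PySem.Set.ofList p)).isEmpty = true := by
      rw [List.isEmpty_iff, List.eq_nil_iff_forall_not_mem]
      intro x hx
      rw [hmem] at hx
      obtain ⟨hx1, hx2⟩ := hx
      obtain ⟨c, hc, rfl⟩ := List.mem_map.mp hx1
      exact h (List.any_eq_true.mpr ⟨c, hc, by simpa [List.contains_eq_mem] using hx2⟩)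
    simp [he]

-- ===== VERDICT (by name: the statement is the Claim_ definition above) =====
theorem getPunExist_spec : Claim_equal_getPunExist := by
  intro Str punc _
  unfold Spec_getPunExist
  rw [alt_eq, getPunExist, pvALoop_eq_any]
  by_cases hp : punc.length = 0
  · rw [if_neg (show ¬ punc.length ≠ 0 by simpa using hp), if_pos hp,
      List.any_congr rfl (fun c => default_mem c)]
  · rw [if_pos (show punc.length ≠ 0 from hp), if_neg hp]
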